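-- pv_equiv track=rewrite | github.com/fpddmw/https---github.com-fpddmw-eco-concil-runtime | skills/eco-materialize-final-publication/scripts/eco_materialize_final_publication.py | operator_review_hints
-- ===== SOURCE A (Python) =====
-- from typing import Any
--
-- def normalize_space(value: Any) -> str:
--     return " ".join(str(value).split())
--
-- def maybe_text(value: Any) -> str:
--     if value is None:
--         return ""
--     return normalize_space(value)
--
-- def unique_texts(values: list[Any]) -> list[str]:
--     seen: set[str] = set()
--     results: list[str] = []
--     for value in values:
--         text = maybe_text(value)
--         if not text or text in seen:
--             continue
--         seen.add(text)
--         results.append(text)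
--     return results
--
-- def operator_review_hints(supervisor_state: dict[str, Any], handoff: dict[str, Any], publication_posture: str) -> list[str]:
--     results: list[str] = []
--     notes = supervisor_state.get("operator_notes", []) if isinstance(supervisor_state.get("operator_notes"), list) else []
--     results.extend(maybe_text(item) for item in notes if maybe_text(item))
--     if publication_posture != "release":
--         risks = handoff.get("open_risks", []) if isinstance(handoff.get("open_risks"), list) else []
--         results.extend(maybe_text(item.get("summary")) for item in risks[:3] if isinstance(item, dict) and maybe_text(item.get("summary")))
--     return unique_texts(results)[:5]
-- ===== SOURCE B (Python) =====
-- def operator_review_hints(supervisor_state, handoff, publication_posture):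
--     def candidates():
--         notes = supervisor_state.get("operator_notes")
--         if isinstance(notes, list):
--             yield from notes
--         if publication_posture != "release":
--             risks = handoff.get("open_risks")
--             if isinstance(risks, list):
--                 for item in risks[:3]:
--                     if isinstance(item, dict):
--                         yield item.get("summary")
--
--     seen = set()
--     out = []
--     for value in candidates():
--         text = "" if value is None else " ".join(str(value).split())
--         if text and text not in seen:
--             seen.add(text)
--             out.append(text)
--             if len(out) == 5:
--                 break
--     return out
-- ===== Notes on version B (the rewrite author's own statement) =====
-- stated objective: alternative
-- what changed: A builds the full hint list in two extend phases, re-normalizes everything in a separate unique_texts dedupe pass and slices to 5; B streams the candidates lazily and does normalize + dedupe + cap in one early-terminating loop that stops at the 5th unique hint.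
import Mathlib
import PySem

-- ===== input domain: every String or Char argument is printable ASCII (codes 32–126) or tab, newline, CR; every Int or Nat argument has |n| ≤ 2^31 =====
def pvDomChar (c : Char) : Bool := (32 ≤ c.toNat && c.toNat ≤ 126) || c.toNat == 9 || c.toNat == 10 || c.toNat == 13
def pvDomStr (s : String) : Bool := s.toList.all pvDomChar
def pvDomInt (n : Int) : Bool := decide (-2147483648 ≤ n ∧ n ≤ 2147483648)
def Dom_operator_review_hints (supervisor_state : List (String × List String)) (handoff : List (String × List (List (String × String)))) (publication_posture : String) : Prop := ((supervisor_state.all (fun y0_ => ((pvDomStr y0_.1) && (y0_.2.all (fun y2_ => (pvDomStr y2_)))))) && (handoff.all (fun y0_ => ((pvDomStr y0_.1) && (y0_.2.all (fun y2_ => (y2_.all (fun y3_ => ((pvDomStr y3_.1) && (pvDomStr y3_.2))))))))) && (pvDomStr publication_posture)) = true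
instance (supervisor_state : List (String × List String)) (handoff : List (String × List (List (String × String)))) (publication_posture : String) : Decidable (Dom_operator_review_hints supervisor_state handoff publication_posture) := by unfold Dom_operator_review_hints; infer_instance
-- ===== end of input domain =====

-- B fuses A's three phases (build the full candidate list, dedupe it all, slice to 5) into one
-- early-terminating pass over the candidate stream; objective: alternative (stops at the 5th unique hint).

-- ===== PORT A =====
-- normalize_space(value) for a str value: " ".join(str(value).split()) (str(value) = value on str input)
def normalize_space (s : String) : String := PySem.Str.join " " (PySem.Str.split₀ s)

-- maybe_text(value) for a str value (never None at these call sites with str arguments)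
def maybe_text (s : String) : String := normalize_space s

-- maybe_text(item.get("summary")): the argument is Optional[str]
def maybe_textOpt (v : Option String) : String :=
  match v with
  | none => ""
  | some s => normalize_space s

-- the loop of unique_texts (values are the str elements of `results`)
def unique_texts_go : List String → PySem.Set String → List String → List String
  | [], _, results => results
  | v :: rest, seen, results =>
    let text := maybe_text v
    if text = "" ∨ PySem.Set.contains seen text then unique_texts_go rest seen results
    else unique_texts_go rest (PySem.Set.add seen text) (results ++ [text])

def unique_texts (values : List String) : List String := unique_texts_go values [] []

def operator_review_hints (supervisor_state : List (String × List String)) (handoff : List (String × List (List (String × String)))) (publication_posture : String) : List String :=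
  -- supervisor_state.get("operator_notes", []) …: on this typed domain the value (if present) is always a list
  let notes := PySem.Dict.getD (PySem.Dict.mk supervisor_state) "operator_notes" []
  let results := ([] : List String) ++ (notes.filter (fun item => maybe_text item ≠ "")).map (fun item => maybe_text item)
  let results :=
    if publication_posture ≠ "release" then
      let risks := PySem.Dict.getD (PySem.Dict.mk handoff) "open_risks" []
      -- item is always a dict here (typed domain), so the isinstance(item, dict) guard is always true
      results ++ ((PySem.List.slice risks none (some 3)).filter
          (fun item => maybe_textOpt (PySem.Dict.get? (PySem.Dict.mk item) "summary") ≠ "")).map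
          (fun item => maybe_textOpt (PySem.Dict.get? (PySem.Dict.mk item) "summary"))
    else results
  PySem.List.slice (unique_texts results) none (some 5)

-- ===== PORT B =====
-- the single fused loop of Source B: normalize, skip empty/seen, stop at 5
def alt_loop : List (Option String) → PySem.Set String → List String → List String
  | [], _, out => out
  | v :: rest, seen, out =>
    let text := match v with | none => "" | some s => PySem.Str.join " " (PySem.Str.split₀ s)
    if text ≠ "" ∧ ¬ PySem.Set.contains seen text then
      let out' := out ++ [text]
      if out'.length = 5 then out' else alt_loop rest (PySem.Set.add seen text) out'
    else alt_loop rest seen out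

def operator_review_hints_alt (supervisor_state : List (String × List String)) (handoff : List (String × List (List (String × String)))) (publication_posture : String) : List String :=
  -- the candidate stream of Source B's generator, materialized
  let cands : List (Option String) :=
    (PySem.Dict.getD (PySem.Dict.mk supervisor_state) "operator_notes" []).map some
    ++ (if publication_posture ≠ "release" then
          (PySem.List.slice (PySem.Dict.getD (PySem.Dict.mk handoff) "open_risks" []) none (some 3)).map
            (fun item => PySem.Dict.get? (PySem.Dict.mk item) "summary")
        else [])
  alt_loop cands [] []

-- ===== PRECONDITION & SPEC =====
def Spec_operator_review_hints (supervisor_state : List (String × List String)) (handoff : List (String × List (List (String × String)))) (publication_posture : String) (out : List String) : Prop := out = operator_review_hints_alt supervisor_state handoff publication_posture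
instance (supervisor_state : List (String × List String)) (handoff : List (String × List (List (String × String)))) (publication_posture : String) (out : List String) : Decidable (Spec_operator_review_hints supervisor_state handoff publication_posture out) := by unfold Spec_operator_review_hints; infer_instance

-- ===== CLAIM (what is proved, stated in full; the proofs are below) =====
def Claim_equal_operator_review_hints : Prop := ∀ (supervisor_state : List (String × List String)) (handoff : List (String × List (List (String × String)))) (publication_posture : String), Dom_operator_review_hints supervisor_state handoff publication_posture → Spec_operator_review_hints supervisor_state handoff publication_posture (operator_review_hints supervisor_state handoff publication_posture)

-- ===== LEMMAS AND PROOFS =====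

-- a token is "clean" if it is nonempty and whitespace-free
def CleanTok (t : List Char) : Prop := t ≠ [] ∧ ∀ c ∈ t, PySem.Chars.isspace c = false

-- consuming a whitespace-free chunk just accumulates it (reversed) into cur
theorem splitgo_chunk (t : List Char) (s : List Char) (cur : List Char) (acc : List (List Char))
    (h : ∀ c ∈ t, PySem.Chars.isspace c = false) :
    PySem.Chars.split₀.go (t ++ s) cur acc = PySem.Chars.split₀.go s (t.reverse ++ cur) acc := by
  induction t generalizing cur with
  | nil => simp
  | cons c t ih =>
    have hc : PySem.Chars.isspace c = false := h c (List.mem_cons_self ..)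
    simp only [List.cons_append, PySem.Chars.split₀.go, hc, Bool.false_eq_true, if_false]
    rw [ih (c :: cur) (fun c hc => h c (List.mem_cons_of_mem _ hc))]
    simp

-- every token split₀ produces is clean
theorem splitgo_clean (s : List Char) (cur : List Char) (acc : List (List Char))
    (hacc : ∀ t ∈ acc, CleanTok t) (hcur : ∀ c ∈ cur, PySem.Chars.isspace c = false) :
    ∀ t ∈ PySem.Chars.split₀.go s cur acc, CleanTok t := by
  induction s generalizing cur acc with
  | nil =>
    intro t ht
    simp only [PySem.Chars.split₀.go] at ht
    by_cases hc : cur = []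
    · simp [hc] at ht
      exact hacc t ht
    · simp [List.isEmpty_iff, hc] at ht
      rcases ht with ht | ht
      · exact hacc t ht
      · subst ht
        refine ⟨by simpa using hc, ?_⟩
        intro c hc'; exact hcur c (List.mem_reverse.mp hc')
  | cons c s ih =>
    intro t ht
    simp only [PySem.Chars.split₀.go] at ht
    by_cases hsp : PySem.Chars.isspace c = true
    · simp only [hsp, if_true] at ht
      by_cases hc : cur = []
      · simp [hc] at ht
        exact ih [] acc hacc (by simp) t ht
      · simp [List.isEmpty_iff, hc] at ht
        refine ih [] (cur.reverse :: acc) ?_ (by simp) t ht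
        intro u hu
        rcases List.mem_cons.mp hu with hu | hu
        · subst hu
          exact ⟨by simpa using hc, fun d hd => hcur d (List.mem_reverse.mp hd)⟩
        · exact hacc u hu
    · simp only [hsp] at ht
      refine ih (c :: cur) acc hacc ?_ t ht
      intro d hd
      rcases List.mem_cons.mp hd with hd | hd
      · subst hd; simpa using hsp
      · exact hcur d hd

-- splitting a space-joined list of clean tokens gives the tokens back
theorem splitgo_join (ts : List (List Char)) (acc : List (List Char))
    (h : ∀ t ∈ ts, CleanTok t) :
    PySem.Chars.split₀.go (List.intercalate [' '] ts) [] acc = acc.reverse ++ ts := by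
  induction ts generalizing acc with
  | nil => simp [List.intercalate, PySem.Chars.split₀.go]
  | cons t ts ih =>
    obtain ⟨hne, hcl⟩ := h t (List.mem_cons_self ..)
    cases ts with
    | nil =>
      rw [show List.intercalate [' '] [t] = t ++ [] by simp [List.intercalate]]
      rw [splitgo_chunk t [] [] acc hcl]
      simp [PySem.Chars.split₀.go, List.isEmpty_iff, hne]
    | cons t' ts' =>
      rw [show List.intercalate [' '] (t :: t' :: ts') = t ++ (' ' :: List.intercalate [' '] (t' :: ts')) by
        simp [List.intercalate, List.intersperse]]
      rw [splitgo_chunk t _ [] acc hcl]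
      have hsp : PySem.Chars.isspace ' ' = true := by decide
      simp only [PySem.Chars.split₀.go, hsp, if_true, List.append_nil,
        List.isEmpty_iff, List.reverse_eq_nil_iff, hne, if_false, List.reverse_reverse]
      rw [ih _ (fun u hu => h u (List.mem_cons_of_mem _ hu))]
      simp

theorem split_clean (s : List Char) : ∀ t ∈ PySem.Chars.split₀ s, CleanTok t := by
  unfold PySem.Chars.split₀
  exact splitgo_clean s [] [] (by simp) (by simp)

theorem split_join_split (s : List Char) :
    PySem.Chars.split₀ (PySem.Chars.join [' '] (PySem.Chars.split₀ s)) = PySem.Chars.split₀ s := by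
  show PySem.Chars.split₀.go (List.intercalate [' '] (PySem.Chars.split₀ s)) [] [] = _
  rw [splitgo_join _ [] (split_clean s)]
  rfl

theorem norm_eq_ofList (s : String) :
    normalize_space s = String.ofList (PySem.Chars.join [' '] (PySem.Chars.split₀ s.toList)) := by
  simp only [normalize_space, PySem.Str.join, PySem.Str.split₀, List.map_map]
  congr 1
  simp [Function.comp_def]

theorem toList_norm (s : String) :
    (normalize_space s).toList = PySem.Chars.join [' '] (PySem.Chars.split₀ s.toList) := by
  rw [norm_eq_ofList]; simp

-- normalize_space is idempotent
theorem norm_idem (s : String) : normalize_space (normalize_space s) = normalize_space s := by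
  rw [norm_eq_ofList (normalize_space s), toList_norm, split_join_split, ← norm_eq_ofList]

theorem norm_empty : normalize_space "" = "" := rfl

-- the candidate → text map both ports use
def textOf (v : Option String) : String :=
  match v with
  | none => ""
  | some s => normalize_space s

theorem textOf_eq_maybe (v : Option String) : maybe_textOpt v = textOf v := rfl

theorem normalize_textOf (v : Option String) : normalize_space (textOf v) = textOf v := by
  cases v with
  | none => exact norm_empty
  | some s => exact norm_idem s

-- the shared dedupe skeleton: skip empty and seen texts
def dedupe (seen : PySem.Set String) : List String → List String
  | [] => []
  | t :: rest =>
    if t = "" ∨ PySem.Set.contains seen t then dedupe seen rest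
    else t :: dedupe (PySem.Set.add seen t) rest

theorem unique_texts_go_eq (values : List String) (seen : PySem.Set String) (results : List String)
    (h : ∀ v ∈ values, normalize_space v = v) :
    unique_texts_go values seen results = results ++ dedupe seen values := by
  induction values generalizing seen results with
  | nil => simp [unique_texts_go, dedupe]
  | cons v rest ih =>
    have hv : maybe_text v = v := h v (List.mem_cons_self ..)
    have hrest : ∀ u ∈ rest, normalize_space u = u := fun u hu => h u (List.mem_cons_of_mem _ hu)
    simp only [unique_texts_go, dedupe, hv]
    by_cases hc : v = "" ∨ PySem.Set.contains seen v
    · rw [if_pos hc, if_pos hc, ih _ _ hrest]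
    · rw [if_neg hc, if_neg hc, ih _ _ hrest]
      simp

theorem alt_loop_eq (cands : List (Option String)) (seen : PySem.Set String) (out : List String)
    (h : out.length < 5) :
    alt_loop cands seen out = (out ++ dedupe seen (cands.map textOf)).take 5 := by
  induction cands generalizing seen out with
  | nil => simp [alt_loop, dedupe, List.take_of_length_le (Nat.le_of_lt h)]
  | cons v rest ih =>
    have htext : (match v with | none => "" | some s => PySem.Str.join " " (PySem.Str.split₀ s)) = textOf v := by
      cases v <;> rfl
    simp only [alt_loop, htext, List.map_cons, dedupe]
    by_cases hk : textOf v ≠ "" ∧ ¬ PySem.Set.contains seen (textOf v)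
    · rw [if_pos hk]
      have hd : ¬ (textOf v = "" ∨ PySem.Set.contains seen (textOf v)) := by tauto
      rw [if_neg hd]
      by_cases h5 : (out ++ [textOf v]).length = 5
      · rw [if_pos h5]
        have h4 : out.length = 4 := by simp at h5; omega
        rw [List.take_append, List.take_of_length_le (by omega)]
        simp [h4]
      · rw [if_neg h5]
        rw [ih _ _ (by simp at h5 ⊢; omega)]
        simp
    · rw [if_neg hk]
      have hd : textOf v = "" ∨ PySem.Set.contains seen (textOf v) := by tauto
      rw [if_pos hd, ih _ _ h]

-- dedupe ignores the empty texts, so pre-filtering them away changes nothing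
theorem dedupe_filter (seen : PySem.Set String) (ts : List String) :
    dedupe seen (ts.filter (fun t => t ≠ "")) = dedupe seen ts := by
  induction ts generalizing seen with
  | nil => rfl
  | cons t rest ih =>
    by_cases h1 : t = ""
    · have hb : (decide (t ≠ "")) = false := by simp [h1]
      rw [List.filter_cons, hb]
      simp only [Bool.false_eq_true, if_false]
      rw [ih]
      show _ = dedupe seen (t :: rest)
      simp only [dedupe]
      rw [if_pos (Or.inl h1)]
    · have hb : (decide (t ≠ "")) = true := by simp [h1]
      rw [List.filter_cons, hb]
      simp only [if_true, dedupe]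
      by_cases hc : PySem.Set.contains seen t
      · rw [if_pos (Or.inr hc), if_pos (Or.inr hc), ih]
      · rw [if_neg (by tauto), if_neg (by tauto), ih]

-- A's filter-then-map over raw candidates equals filter-then-map of the text stream
theorem regroup {α : Type} (l : List α) (g : α → Option String) :
    (l.filter (fun i => maybe_textOpt (g i) ≠ "")).map (fun i => maybe_textOpt (g i))
    = ((l.map g).filter (fun v => textOf v ≠ "")).map (fun v => textOf v) := by
  induction l with
  | nil => rfl
  | cons a l ih =>
    have hmt : ∀ w, maybe_textOpt w = textOf w := textOf_eq_maybe
    by_cases hb : textOf (g a) = ""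
    · simp [hmt, hb]
      all_goals simpa using ih
    · simp [hmt, hb]
      all_goals simpa using ih

theorem regroup_notes (notes : List String) :
    (notes.filter (fun i => maybe_text i ≠ "")).map (fun i => maybe_text i)
    = ((notes.map some).filter (fun v => textOf v ≠ "")).map (fun v => textOf v) := by
  induction notes with
  | nil => rfl
  | cons a l ih =>
    have hma : ∀ s, maybe_text s = textOf (some s) := fun _ => rfl
    by_cases hb : textOf (some a) = ""
    · simp [hma, hb]
      all_goals simpa using ih
    · simp [hma, hb]
      all_goals simpa using ih

-- filter-on-text-of-candidate commutes with mapping to texts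
theorem mapfilter (cs : List (Option String)) :
    (cs.filter (fun v => textOf v ≠ "")).map (fun v => textOf v)
    = (cs.map textOf).filter (fun t => t ≠ "") := by
  induction cs with
  | nil => rfl
  | cons v cs ih =>
    by_cases hb : textOf v = ""
    · simp [hb]
      all_goals simpa using ih
    · simp [hb]
      all_goals simpa using ih

-- both whole pipelines agree once the candidate stream is fixed
theorem combined (cs : List (Option String)) :
    PySem.List.slice (unique_texts ((cs.filter (fun v => textOf v ≠ "")).map (fun v => textOf v))) none (some 5)
    = alt_loop cs [] [] := by
  rw [mapfilter]
  rw [PySem.List.slice_to _ (by norm_num)]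
  rw [unique_texts, unique_texts_go_eq _ _ _ ?clean, dedupe_filter,
    alt_loop_eq _ _ _ (by simp)]
  · simp
  case clean =>
    intro v hv
    obtain ⟨c, _, hc⟩ := List.mem_map.mp (List.mem_filter.mp hv).1
    rw [← hc]; exact normalize_textOf c

-- ===== VERDICT (by name: the statement is the Claim_ definition above) =====
theorem operator_review_hints_spec : Claim_equal_operator_review_hints := by
  intro supervisor_state handoff publication_posture _
  show operator_review_hints supervisor_state handoff publication_posture
      = operator_review_hints_alt supervisor_state handoff publication_posture
  unfold operator_review_hints operator_review_hints_alt
  dsimp only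
  by_cases hp : publication_posture ≠ "release"
  · rw [if_pos hp, if_pos hp, List.nil_append, regroup_notes, regroup,
      ← List.map_append, ← List.filter_append]
    exact combined _
  · rw [if_neg hp, if_neg hp, List.nil_append, List.append_nil, regroup_notes]
    exact combined _
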